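-- pv_equiv track=rewrite | github.com/tranvaj/Internship | examples/knapsack_crypt.py | is_superincreasing
-- ===== SOURCE A (Python) =====
-- def is_superincreasing(sequence):
--     # Start by assuming the sequence is empty or has one element
--     if len(sequence) <= 1:
--         return True
--
--     # Initialize the sum of preceding elements
--     sum_preceding = sequence[0]
--
--     # Iterate through the sequence starting from the second element
--     for i in range(1, len(sequence)):
--         # Check if the current element is less than or equal to the sum of preceding elements
--         if sequence[i] <= sum_preceding:
--             return False  # Sequence is not superincreasing
--         # Update the sum of preceding elements
--         sum_preceding += sequence[i]
--
--     return True  # Sequence is superincreasing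
-- ===== SOURCE B (Python) =====
-- def is_superincreasing(sequence):
--     # Backward check: compute the total sum once, then walk from the LAST
--     # element toward the front, recovering the sum of preceding elements
--     # by subtraction instead of forward accumulation.
--     total = sum(sequence)
--     for x in reversed(sequence[1:]):
--         total -= x
--         if x <= total:
--             return False
--     return True
-- ===== Notes on version B (the rewrite author's own statement) =====
-- stated objective: alternative
-- what changed: B computes the total sum once and then traverses the sequence BACKWARDS, recovering each element's preceding-sum by subtraction from the running total, instead of A's forward loop that accumulates a running prefix sum.
import Mathlib
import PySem

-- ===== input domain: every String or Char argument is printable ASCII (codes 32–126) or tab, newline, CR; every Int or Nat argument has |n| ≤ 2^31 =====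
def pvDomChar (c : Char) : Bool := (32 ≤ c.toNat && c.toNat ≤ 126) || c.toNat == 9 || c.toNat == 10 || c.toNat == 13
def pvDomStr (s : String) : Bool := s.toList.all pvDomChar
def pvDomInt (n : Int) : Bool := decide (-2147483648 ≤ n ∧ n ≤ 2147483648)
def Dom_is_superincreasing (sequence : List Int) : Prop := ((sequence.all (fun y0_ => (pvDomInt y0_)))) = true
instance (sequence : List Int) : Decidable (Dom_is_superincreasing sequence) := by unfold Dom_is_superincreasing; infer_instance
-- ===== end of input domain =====

-- B traverses backwards, subtracting from the once-computed total sum instead of accumulating a forward prefix sum (alternative decomposition; return value only).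


-- ===== PORT A =====
-- the for-loop over range(1, len) with early 'return False' and running sum_preceding
def isSuperLoopA : List Int → Int → Bool
  | [], _ => true
  | x :: xs, s => if x ≤ s then false else isSuperLoopA xs (s + x)

def is_superincreasing (sequence : List Int) : Bool :=
  if sequence.length ≤ 1 then true
  else
    match sequence with
    | [] => true              -- unreachable (length > 1)
    | h :: t => isSuperLoopA t h   -- sum_preceding = sequence[0]; loop from the second element

-- ===== PORT B =====
-- backward loop: 'for x in reversed(sequence[1:]): total -= x; if x <= total: return False'
def isSuperLoopB : List Int → Int → Bool
  | [], _ => true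
  | x :: xs, total => let t' := total - x; if x ≤ t' then false else isSuperLoopB xs t'

def is_superincreasing_alt (sequence : List Int) : Bool :=
  isSuperLoopB (sequence.drop 1).reverse sequence.sum   -- total = sum(sequence); [1:] = drop 1 (exact for slice from 1)

-- ===== PRECONDITION & SPEC =====
def Spec_is_superincreasing (sequence : List Int) (out : Bool) : Prop := out = is_superincreasing_alt sequence
instance (sequence : List Int) (out : Bool) : Decidable (Spec_is_superincreasing sequence out) := by unfold Spec_is_superincreasing; infer_instance

-- ===== CLAIM =====
def Claim_equal_is_superincreasing : Prop := ∀ (sequence : List Int), Dom_is_superincreasing sequence → Spec_is_superincreasing sequence (is_superincreasing sequence)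

-- ===== LEMMAS AND PROOFS =====

-- appending one element to A's loop: the loop on u, and if it survives the final state is s + u.sum
theorem isSuperLoopA_append (u : List Int) (x : Int) (s : Int) :
    isSuperLoopA (u ++ [x]) s = (isSuperLoopA u s && decide (s + u.sum < x)) := by
  induction u generalizing s with
  | nil => simp [isSuperLoopA]; by_cases h : x ≤ s <;> simp [h] <;> omega
  | cons y ys ih =>
    simp only [List.cons_append, isSuperLoopA, List.sum_cons]
    by_cases h : y ≤ s
    · simp [h]
    · simp only [if_neg h, ih]
      ring_nf

-- B's backward loop, started at s + t.sum, computes exactly A's forward loop started at s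
theorem loopB_eq_loopA (t : List Int) (s : Int) :
    isSuperLoopB t.reverse (s + t.sum) = isSuperLoopA t s := by
  induction t using List.reverseRecOn generalizing s with
  | nil => rfl
  | append_singleton u x ih =>
    rw [List.reverse_append, List.reverse_singleton, List.singleton_append, isSuperLoopA_append]
    simp only [isSuperLoopB, List.sum_append, List.sum_singleton]
    have e : s + (u.sum + x) - x = s + u.sum := by ring
    rw [e]
    by_cases h : x ≤ s + u.sum
    · simp [h]
    · simp only [if_neg h, ih]
      have : s + u.sum < x := by omega
      simp [this]

-- ===== VERDICT =====
theorem is_superincreasing_spec : Claim_equal_is_superincreasing := by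
  intro sequence _
  unfold Spec_is_superincreasing is_superincreasing is_superincreasing_alt
  match sequence with
  | [] => rfl
  | [h] => rfl
  | h :: x :: t =>
    rw [if_neg (by simp)]
    simp only [List.drop_succ_cons, List.drop_zero, List.sum_cons]
    rw [show h + (x + t.sum) = h + (x :: t).sum from by simp]
    exact (loopB_eq_loopA (x :: t) h).symm
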